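-- pv_equiv track=rewrite | github.com/brenonf/Beecrowd-URI-Solutions | Python/2140.py | verificacao
-- ===== SOURCE A (Python) =====
-- def verificacao(troco):
--     notas = [2,5,10,20,50,100]
--     resultado = False
--     for i in notas:
--         for j in notas:
--             if troco == i + j:
--                 resultado = True
--     return resultado
-- ===== SOURCE B (Python) =====
-- def verificacao(troco):
--     # closed-form: all achievable two-note totals, precomputed once
--     return troco in {4, 7, 10, 12, 15, 20, 22, 25, 30, 40, 52, 55,
--                      60, 70, 100, 102, 105, 110, 120, 150, 200}
-- ===== Notes on version B (the rewrite author's own statement) =====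
-- stated objective: simpler
-- what changed: Replaced the nested loops over the banknote list with a single membership test against a precomputed literal set of all achievable two-note totals.
import Mathlib
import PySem

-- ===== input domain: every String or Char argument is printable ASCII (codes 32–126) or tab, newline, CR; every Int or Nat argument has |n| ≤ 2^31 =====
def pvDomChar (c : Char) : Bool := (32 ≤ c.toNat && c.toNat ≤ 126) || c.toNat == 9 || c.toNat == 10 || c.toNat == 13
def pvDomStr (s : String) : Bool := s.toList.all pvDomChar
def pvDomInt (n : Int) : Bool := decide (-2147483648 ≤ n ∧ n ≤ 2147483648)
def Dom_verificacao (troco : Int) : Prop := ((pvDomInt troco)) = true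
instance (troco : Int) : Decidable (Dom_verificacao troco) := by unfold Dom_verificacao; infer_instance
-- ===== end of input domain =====

-- B replaces A's nested loops over the notes with a membership test in the precomputed
-- literal set of all achievable two-note totals (objective: simpler).
-- ===== PORT A =====
def verificacao (troco : Int) : Bool :=
  let notas : List Int := [2, 5, 10, 20, 50, 100]
  notas.foldl (fun resultado i =>
    notas.foldl (fun resultado j =>
      if troco == i + j then true else resultado) resultado) false

-- ===== PORT B =====
def verificacao_alt (troco : Int) : Bool :=
  -- literal precomputed set of achievable totals; membership test (PySem.Set)
  PySem.Set.ofList ([4, 7, 10, 12, 15, 20, 22, 25, 30, 40, 52, 55,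
                     60, 70, 100, 102, 105, 110, 120, 150, 200] : List Int) |>.contains troco

-- ===== PRECONDITION & SPEC =====
def Spec_verificacao (troco : Int) (out : Bool) : Prop := out = verificacao_alt troco
instance (troco : Int) (out : Bool) : Decidable (Spec_verificacao troco out) := by unfold Spec_verificacao; infer_instance

-- ===== CLAIM (what is proved, stated in full; the proofs are below) =====
def Claim_equal_verificacao : Prop := ∀ (troco : Int), Dom_verificacao troco → Spec_verificacao troco (verificacao troco)

-- ===== LEMMAS AND PROOFS =====

-- ===== VERDICT (by name: the statement is the Claim_ definition above) =====
set_option maxHeartbeats 2000000 in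
theorem verificacao_spec : Claim_equal_verificacao := by
  intro troco _
  unfold Spec_verificacao verificacao verificacao_alt
  have h : PySem.Set.ofList ([4, 7, 10, 12, 15, 20, 22, 25, 30, 40, 52, 55,
      60, 70, 100, 102, 105, 110, 120, 150, 200] : List Int)
      = [4, 7, 10, 12, 15, 20, 22, 25, 30, 40, 52, 55,
         60, 70, 100, 102, 105, 110, 120, 150, 200] := by decide
  rw [h]
  simp only [List.foldl, PySem.Set.contains_eq_listContains, List.contains_eq_mem,
    Bool.if_true_left]
  rw [Bool.eq_iff_iff]
  simp only [Bool.or_eq_true, decide_eq_true_eq, beq_iff_eq, List.mem_cons,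
    List.not_mem_nil, Bool.false_eq_true, or_false]
  omega
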